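-- pv_equiv track=rewrite | github.com/donglixp/coarse2fine | django/table/IO.py | get_lay_index
-- ===== SOURCE A (Python) =====
-- SKP_WORD = '<sk>'
--
-- RIG_WORD = '<]>'
--
-- def get_lay_index(lay_skip):
--     # with a <s> token at the first position
--     r_list = [0]
--     k = 0
--     for tk in lay_skip:
--         if tk in (SKP_WORD, RIG_WORD):
--             r_list.append(0)
--         else:
--             r_list.append(k)
--             k += 1
--     return r_list
-- ===== SOURCE B (Python) =====
-- SKP_WORD = '<sk>'
--
-- RIG_WORD = '<]>'
--
-- def get_lay_index(lay_skip):
--     # two passes: keep-flags, then a prefix-count table, then emit per token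
--     flags = [tk not in (SKP_WORD, RIG_WORD) for tk in lay_skip]
--     prefix = [0] * (len(flags) + 1)
--     for i, f in enumerate(flags):
--         prefix[i + 1] = prefix[i] + f
--     return [0] + [prefix[i] if f else 0 for i, f in enumerate(flags)]
-- ===== Notes on version B (the rewrite author's own statement) =====
-- stated objective: alternative
-- what changed: Replaces the single loop threading a mutable counter with a two-pass decomposition: a keep-flag list and a prefix-count table, then a per-token emit pass reading the table.
import Mathlib
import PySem

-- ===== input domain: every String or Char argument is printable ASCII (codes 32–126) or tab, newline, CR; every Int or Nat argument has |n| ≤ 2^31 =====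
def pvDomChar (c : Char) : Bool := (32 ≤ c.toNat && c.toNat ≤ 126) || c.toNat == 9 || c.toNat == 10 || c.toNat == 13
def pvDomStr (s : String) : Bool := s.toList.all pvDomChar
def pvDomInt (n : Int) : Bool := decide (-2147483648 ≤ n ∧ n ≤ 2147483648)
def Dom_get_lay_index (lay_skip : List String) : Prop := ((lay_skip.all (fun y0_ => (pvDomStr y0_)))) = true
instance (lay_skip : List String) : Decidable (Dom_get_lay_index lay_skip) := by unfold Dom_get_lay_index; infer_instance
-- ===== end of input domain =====

-- B replaces A's single counter-threading loop with a keep-flag list, a prefix-count table and an emit pass (alternative decomposition, same cost).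

-- ===== PORT A =====
-- A: one loop appending to r_list while threading counter k
def get_lay_index (lay_skip : List String) : List Int :=
  (lay_skip.foldl (fun (acc : List Int × Int) tk =>
      if tk = "<sk>" ∨ tk = "<]>" then (acc.1 ++ [0], acc.2)
      else (acc.1 ++ [acc.2], acc.2 + 1)) ([0], 0)).1

-- ===== PORT B =====
-- B's prefix loop: prefix[i+1] = prefix[i] + f; this yields the counts prefix[0..n-1] read by the emit pass
def pvPrefixCounts : List Bool → Int → List Int
  | [], _ => []
  | f :: fs, c => c :: pvPrefixCounts fs (c + (if f then 1 else 0))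

def get_lay_index_alt (lay_skip : List String) : List Int :=
  let flags := lay_skip.map (fun tk => decide (¬ (tk = "<sk>" ∨ tk = "<]>")))
  let pfx := pvPrefixCounts flags 0
  0 :: ((flags.zip pfx).map (fun p => if p.1 then p.2 else 0))

-- ===== PRECONDITION & SPEC =====
def Spec_get_lay_index (lay_skip : List String) (out : List Int) : Prop := out = get_lay_index_alt lay_skip
instance (lay_skip : List String) (out : List Int) : Decidable (Spec_get_lay_index lay_skip out) := by unfold Spec_get_lay_index; infer_instance

-- ===== CLAIM (what is proved, stated in full; the proofs are below) =====
def Claim_equal_get_lay_index : Prop := ∀ (lay_skip : List String), Dom_get_lay_index lay_skip → Spec_get_lay_index lay_skip (get_lay_index lay_skip)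

-- ===== LEMMAS AND PROOFS =====
theorem pv_fold_eq (l : List String) (acc : List Int) (k : Int) :
    (l.foldl (fun (acc : List Int × Int) tk =>
      if tk = "<sk>" ∨ tk = "<]>" then (acc.1 ++ [0], acc.2)
      else (acc.1 ++ [acc.2], acc.2 + 1)) (acc, k)).1 =
    acc ++ (((l.map (fun tk => decide (¬ (tk = "<sk>" ∨ tk = "<]>")))).zip
              (pvPrefixCounts (l.map (fun tk => decide (¬ (tk = "<sk>" ∨ tk = "<]>")))) k)).map
              (fun p => if p.1 then p.2 else 0)) := by
  induction l generalizing acc k with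
  | nil => simp
  | cons tk l ih =>
    by_cases h1 : tk = "<sk>" <;> by_cases h2 : tk = "<]>" <;>
      simp [h1, h2, pvPrefixCounts, List.foldl_cons, ih]

-- ===== VERDICT (by name: the statement is the Claim_ definition above) =====
theorem get_lay_index_spec : Claim_equal_get_lay_index := by
  intro l _
  show get_lay_index l = get_lay_index_alt l
  simp [get_lay_index, get_lay_index_alt, pv_fold_eq]
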